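-- pv_equiv track=rewrite | github.com/doronsacha/HW-introToPython | HW3q1.py | delete_word
-- ===== SOURCE A (Python) =====
-- def delete_word(a,b):
--     b_list = []
--     for i in b:
--         if (i != ' '):
--             b_list.append(i)
--     if a[-1] != ' ':
--         a +=' '
--
--     sentence = ""
--     in_word = False
--     start_word = 0
--     for j in range(len(a)):
--         if (a[j] in b_list) or (in_word):
--             in_word = True
--             start_word=j+1
--         elif a[j] == ' ':
--             sentence= sentence + a[start_word:j+1]
--             start_word=j+1
--         if a[j] == ' ':
--             in_word = False
--     return sentence[0:-1]
-- ===== SOURCE B (Python) =====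
-- def delete_word(a, b):
--     bad = {c for c in b if c != ' '}
--     t = a if a.endswith(' ') else a + ' '
--     words = t.split(' ')[:-1]
--     return ' '.join(w for w in words if all(c not in bad for c in w))
-- ===== Notes on version B (the rewrite author's own statement) =====
-- stated objective: simpler
-- what changed: Replaces A's char-by-char in_word/start_word state machine (with its quadratic repeated string concatenation) by a tokenize-then-filter pass: split the space-terminated string on ' ', drop the final empty token, keep tokens containing no non-space character of b, and ' '.join them; Pre_ excludes only a = '', where A raises IndexError.
import Mathlib
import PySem

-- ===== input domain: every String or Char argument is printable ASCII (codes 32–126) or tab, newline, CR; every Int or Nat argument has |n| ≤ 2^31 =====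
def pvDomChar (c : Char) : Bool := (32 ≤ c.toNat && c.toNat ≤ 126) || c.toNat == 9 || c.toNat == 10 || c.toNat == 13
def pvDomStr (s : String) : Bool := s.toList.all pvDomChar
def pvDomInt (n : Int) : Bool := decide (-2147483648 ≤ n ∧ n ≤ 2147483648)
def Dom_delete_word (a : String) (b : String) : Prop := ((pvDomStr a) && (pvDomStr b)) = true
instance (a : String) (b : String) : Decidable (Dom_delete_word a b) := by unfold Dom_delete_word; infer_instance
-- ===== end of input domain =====

-- B replaces A's char-by-char in_word state machine by tokenize (split on ' '), filter, join — simpler, and measurably faster (A re-concatenates the sentence string).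

-- ===== PORT A =====
-- the body of A's for-loop, as a named helper (state = (sentence, in_word, start_word))
def stepA (b_list al : List Char) (s : List Char × Bool × Int) (j : Int) : List Char × Bool × Int :=
  let sentence := s.1; let in_word := s.2.1; let start_word := s.2.2
  let c := PySem.List.pyGetD al j ' '
  let s' : List Char × Bool × Int :=
    if b_list.contains c || in_word then (sentence, true, j + 1)
    else if c = ' ' then
      (sentence ++ PySem.List.slice al (some start_word) (some (j + 1)), in_word, j + 1)
    else (sentence, in_word, start_word)
  if c = ' ' then (s'.1, false, s'.2.2) else s'

def delete_word (a : String) (b : String) : String :=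
  let b_list : List Char := b.toList.foldl (fun acc i => if i ≠ ' ' then acc ++ [i] else acc) []
  match PySem.Str.pyGet? a (-1) with
  | none => ""   -- Python raises IndexError here (excluded by Pre_delete_word)
  | some last =>
    let al : List Char := if last ≠ ' ' then a.toList ++ [' '] else a.toList
    let fin : List Char × Bool × Int :=
      (PySem.List.pyRange 0 al.length 1).foldl (stepA b_list al) ([], false, 0)
    String.ofList (PySem.List.slice fin.1 (some 0) (some (-1)))

-- ===== PORT B =====
def delete_word_alt (a : String) (b : String) : String :=
  let bad : PySem.Set Char := PySem.Set.ofList (b.toList.filter (fun c => c ≠ ' '))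
  let t : List Char := if PySem.Chars.endswith a.toList [' '] then a.toList else a.toList ++ [' ']
  let words : List (List Char) := PySem.List.slice (PySem.Chars.splitOn t [' ']) none (some (-1))
  String.ofList (PySem.Chars.join [' ']
    (words.filter (fun w => w.all (fun c => !(PySem.Set.contains bad c)))))

-- ===== PRECONDITION & SPEC =====
-- Pre_ excludes only a = "", on which A raises IndexError (a[-1]).
def Pre_delete_word (a : String) (b : String) : Prop := a ≠ ""
instance (a : String) (b : String) : Decidable (Pre_delete_word a b) := by unfold Pre_delete_word; infer_instance
def pvWitness_delete_word : String × String := ("hi x hello", "x")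

def Spec_delete_word (a : String) (b : String) (out : String) : Prop := out = delete_word_alt a b
instance (a : String) (b : String) (out : String) : Decidable (Spec_delete_word a b out) := by unfold Spec_delete_word; infer_instance

-- ===== CLAIM (what is proved, stated in full; the proofs are below) =====
def Claim_equal_delete_word : Prop := ∀ (a : String) (b : String), Dom_delete_word a b → Pre_delete_word a b → Spec_delete_word a b (delete_word a b)
-- ===== LEMMAS AND PROOFS =====

-- a simple recursive tokenizer: `toks cur s` = the pieces of `cur ++ s` split at each ' '
def toks (cur : List Char) : List Char → List (List Char)
  | [] => [cur]
  | c :: rest => if c = ' ' then cur :: toks [] rest else toks (cur ++ [c]) rest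

-- glue a list of space-free words back, each followed by one ' '
def buildT (ws : List (List Char)) : List Char := ws.flatMap (fun w => w ++ [' '])

theorem go_eq_toks (s : List Char) : ∀ (fuel : Nat) (cur : List Char) (acc : List (List Char)),
    s.length ≤ fuel → PySem.Chars.splitOn.go [' '] fuel s cur acc = acc.reverse ++ toks cur.reverse s := by
  induction s with
  | nil =>
    intro fuel cur acc _
    cases fuel <;> simp [PySem.Chars.splitOn.go, toks]
  | cons c rest ih =>
    intro fuel cur acc hf
    cases fuel with
    | zero => simp at hf
    | succ f =>
      by_cases hc : c = ' '
      · subst hc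
        simp [PySem.Chars.splitOn.go, List.isPrefixOf, toks, ih f [] (cur.reverse :: acc) (by simpa using hf)]
      · simp [PySem.Chars.splitOn.go, List.isPrefixOf, hc, toks,
          ih f (c :: cur) acc (by simpa using Nat.le_of_succ_le_succ hf)]
        exact fun h => absurd h.symm hc

theorem splitOn_eq_toks (s : List Char) : PySem.Chars.splitOn s [' '] = toks [] s := by
  simpa [PySem.Chars.splitOn] using go_eq_toks s (s.length + 1) [] [] (by omega)

theorem dropLast_buildT (ws : List (List Char)) :
    (buildT ws).dropLast = List.intercalate [' '] ws := by
  induction ws with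
  | nil => simp [buildT, List.intercalate]
  | cons w ws' ih =>
    cases ws' with
    | nil => simp [buildT, List.intercalate]
    | cons v t =>
      have hne : buildT (v :: t) ≠ [] := by simp [buildT]
      rw [show buildT (w :: v :: t) = (w ++ [' ']) ++ buildT (v :: t) by simp [buildT],
        List.dropLast_append_of_ne_nil hne, ih]
      simp [List.intercalate, List.intersperse]

theorem toks_ne_nil (s : List Char) : ∀ cur, toks cur s ≠ [] := by
  induction s with
  | nil => intro cur; simp [toks]
  | cons c rest ih => intro cur; by_cases hc : c = ' ' <;> simp [toks, hc, ih]

theorem toks_dropLast_space_free (s : List Char) : ∀ cur, (∀ c ∈ cur, c ≠ ' ') →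
    ∀ w ∈ (toks cur s).dropLast, ∀ c ∈ w, c ≠ ' ' := by
  induction s with
  | nil => intro cur _; simp [toks]
  | cons c rest ih =>
    intro cur hcur
    by_cases hc : c = ' '
    · subst hc
      rw [show toks cur (' ' :: rest) = cur :: toks [] rest by simp [toks],
        List.dropLast_cons_of_ne_nil (toks_ne_nil rest [])]
      intro w hw
      rcases List.mem_cons.mp hw with h | h
      · exact h ▸ hcur
      · exact ih [] (by simp) w h
    · rw [show toks cur (c :: rest) = toks (cur ++ [c]) rest by simp [toks, hc]]
      exact ih (cur ++ [c]) (by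
        intro x hx
        rcases List.mem_append.mp hx with h | h
        · exact hcur x h
        · simp at h; exact h ▸ hc)

theorem toks_buildT (s : List Char) : ∀ cur (hne : s ≠ []), s.getLast hne = ' ' →
    cur ++ s = buildT ((toks cur s).dropLast) := by
  induction s with
  | nil => intro cur hne _; exact absurd rfl hne
  | cons c rest ih =>
    intro cur hne hlast
    by_cases hc : c = ' '
    · subst hc
      rw [show toks cur (' ' :: rest) = cur :: toks [] rest by simp [toks]]
      cases hr : rest with
      | nil => simp [toks, buildT]
      | cons d t =>
        subst hr
        rw [List.dropLast_cons_of_ne_nil (toks_ne_nil (d :: t) [])]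
        rw [List.getLast_cons (by simp : (d : Char) :: t ≠ [])] at hlast
        have := ih [] (by simp) hlast
        simp only [List.nil_append, buildT] at this
        simp [buildT, ← this]
    · have hrne : rest ≠ [] := by
        rintro rfl
        simp [List.getLast] at hlast
        exact hc hlast
      rw [show toks cur (c :: rest) = toks (cur ++ [c]) rest by simp [toks, hc]]
      have := ih (cur ++ [c]) hrne (by rw [← List.getLast_cons (l := rest) hrne]; exact hlast)
      simpa using this

-- ===== the A-side state machine =====

theorem getD_of_drop (T : List Char) (i : Nat) (c : Char) (l2 : List Char)
    (h : T.drop i = c :: l2) : PySem.List.pyGetD T (i : Int) ' ' = c := by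
  have h0 : T[i]? = some c := by
    have h2 : (List.drop i T)[0]? = T[i + 0]? := List.getElem?_drop
    rw [h] at h2
    simpa using h2.symm
  rw [PySem.List.pyGetD_natCast, List.getD_eq_getElem?_getD, h0]
  rfl

theorem drop_succ_of_drop (T : List Char) (i : Nat) (c : Char) (l2 : List Char)
    (h : T.drop i = c :: l2) : T.drop (i + 1) = l2 := by
  have h2 : List.drop 1 (List.drop i T) = List.drop (i + 1) T := by rw [List.drop_drop]
  rw [← h2, h]
  simp

theorem word_run (bl T : List Char) :
    ∀ (w : List Char) (i : Nat) (rest : List Char) (s : List Char) (st : Int) (inw : Bool),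
    (∀ c ∈ w, c ≠ ' ') → T.drop i = w ++ rest → (inw = true → st = (i : Int)) →
    (PySem.List.pyRange (i : Int) ((i + w.length : Nat) : Int)).foldl (stepA bl T) (s, inw, st)
      = (s, inw || w.any (bl.contains ·),
          if inw || w.any (bl.contains ·) then ((i + w.length : Nat) : Int) else st) := by
  intro w
  induction w with
  | nil =>
    intro i rest s st inw _ _ hst
    rw [PySem.List.pyRange_one_eq_nil (by simp)]
    cases inw with
    | false => simp
    | true => simp [hst rfl]
  | cons c w' ih =>
    intro i rest s st inw hw hdrop hst
    have hc : c ≠ ' ' := hw c (by simp)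
    have hget : PySem.List.pyGetD T (i : Int) ' ' = c := getD_of_drop T i c _ hdrop
    have hlt : (i : Int) < ((i + (c :: w').length : Nat) : Int) := by
      have : i < i + (c :: w').length := by simp
      exact_mod_cast this
    rw [PySem.List.pyRange_one_cons hlt]
    have hdrop' : T.drop (i + 1) = w' ++ rest := drop_succ_of_drop T i c _ hdrop
    have hcast1 : ((i : Int) + 1) = ((i + 1 : Nat) : Int) := by push_cast; ring
    have hlen : ((i + (c :: w').length : Nat) : Int) = ((i + 1 + w'.length : Nat) : Int) := by
      have : i + (c :: w').length = i + 1 + w'.length := by simp [List.length_cons]; omega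
      rw [this]
    rw [hlen]
    by_cases hm : c ∈ bl
    · -- the word is triggered at c (or was already in_word)
      have hstep : stepA bl T (s, inw, st) (i : Int) = (s, true, (i : Int) + 1) := by
        simp [stepA, hget, hm, hc]
      rw [List.foldl_cons, hstep, hcast1,
        ih (i + 1) rest s ((i + 1 : Nat) : Int) true (fun x hx => hw x (by simp [hx])) hdrop' (fun _ => rfl)]
      simp [hm]
    · cases hinw : inw with
      | true =>
        have hstep : stepA bl T (s, true, st) (i : Int) = (s, true, (i : Int) + 1) := by
          simp [stepA, hget, hc]
        rw [List.foldl_cons, hstep, hcast1,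
          ih (i + 1) rest s ((i + 1 : Nat) : Int) true (fun x hx => hw x (by simp [hx])) hdrop' (fun _ => rfl)]
        simp
      | false =>
        have hstep : stepA bl T (s, false, st) (i : Int) = (s, false, st) := by
          simp [stepA, hget, hm, hc]
        rw [List.foldl_cons, hstep, hcast1,
          ih (i + 1) rest s st false (fun x hx => hw x (by simp [hx])) hdrop' (by simp)]
        simp [hm]

theorem token_run (bl T : List Char) (hbl : ' ' ∉ bl)
    (w : List Char) (i : Nat) (rest : List Char) (s : List Char)
    (hw : ∀ c ∈ w, c ≠ ' ') (hdrop : T.drop i = w ++ ' ' :: rest) :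
    (PySem.List.pyRange (i : Int) ((i + w.length + 1 : Nat) : Int)).foldl (stepA bl T) (s, false, (i : Int))
      = ((if w.any (bl.contains ·) then s else s ++ w ++ [' ']), false, ((i + w.length + 1 : Nat) : Int)) := by
  have hsp : T.drop (i + w.length) = ' ' :: rest := by
    have h2 : List.drop w.length (List.drop i T) = List.drop (i + w.length) T := by
      rw [List.drop_drop]
    rw [← h2, hdrop, List.drop_left]
  have hget : PySem.List.pyGetD T ((i + w.length : Nat) : Int) ' ' = ' ' :=
    getD_of_drop T (i + w.length) ' ' rest hsp
  have hsplit : PySem.List.pyRange (i : Int) ((i + w.length + 1 : Nat) : Int)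
      = PySem.List.pyRange (i : Int) ((i + w.length : Nat) : Int)
        ++ [((i + w.length : Nat) : Int)] := by
    rw [PySem.List.pyRange_one_append (i : Int) ((i + w.length : Nat) : Int)
        ((i + w.length + 1 : Nat) : Int) (by exact_mod_cast Nat.le_add_right i w.length)
        (by exact_mod_cast Nat.le_succ (i + w.length)),
      show PySem.List.pyRange ((i + w.length : Nat) : Int) ((i + w.length + 1 : Nat) : Int)
          = [((i + w.length : Nat) : Int)] from by
        rw [PySem.List.pyRange_one_cons (by exact_mod_cast Nat.lt_succ_self (i + w.length)),
          PySem.List.pyRange_one_eq_nil (by push_cast; omega)]]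
  rw [hsplit, List.foldl_append,
    word_run bl T w i (' ' :: rest) s (i : Int) false hw hdrop (by simp)]
  have hslice : PySem.List.slice T (some (i : Int)) (some (((i + w.length : Nat) : Int) + 1))
      = w ++ [' '] := by
    rw [show (((i + w.length : Nat) : Int) + 1) = ((i + w.length + 1 : Nat) : Int) by push_cast; ring,
      PySem.List.slice_natCast, hdrop]
    rw [show i + w.length + 1 - i = w.length + 1 by omega, List.take_append]
    simp
  set k : Int := ((i + w.length : Nat) : Int) with hk
  cases hany : w.any (bl.contains ·) with
  | true =>
    have hstep : stepA bl T (s, true, k) k = (s, false, k + 1) := by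
      simp [stepA, hget]
    simp only [List.foldl_cons, List.foldl_nil, Bool.false_or, if_true, hstep]
    have : k + 1 = ((i + w.length + 1 : Nat) : Int) := by rw [hk]; push_cast; ring
    rw [this]
  | false =>
    have hstep : stepA bl T (s, false, (i : Int)) k
        = (s ++ (w ++ [' ']), false, k + 1) := by
      simp [stepA, hget, hbl, hslice]
    simp only [List.foldl_cons, List.foldl_nil, Bool.false_or, Bool.false_eq_true,
      if_false, hstep]
    have : k + 1 = ((i + w.length + 1 : Nat) : Int) := by rw [hk]; push_cast; ring
    rw [this, List.append_assoc]

theorem machine_run (bl T : List Char) (hbl : ' ' ∉ bl) :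
    ∀ (ws : List (List Char)) (i : Nat) (s : List Char),
    (∀ w ∈ ws, ∀ c ∈ w, c ≠ ' ') → T.drop i = buildT ws → i ≤ T.length →
    (PySem.List.pyRange (i : Int) (T.length : Int)).foldl (stepA bl T) (s, false, (i : Int))
      = (s ++ (ws.filter (fun w => !w.any (bl.contains ·))).flatMap (fun w => w ++ [' ']),
         false, (T.length : Int)) := by
  intro ws
  induction ws with
  | nil =>
    intro i s _ hdrop hi
    have hi' : i = T.length := by
      have := List.drop_eq_nil_iff.mp (by rw [hdrop]; rfl)
      omega
    subst hi'
    rw [PySem.List.pyRange_one_eq_nil (by omega)]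
    simp
  | cons w ws' ih =>
    intro i s hws hdrop hi
    have hdrop' : T.drop i = w ++ ' ' :: buildT ws' := by rw [hdrop]; simp [buildT]
    have hlen : T.length - i = w.length + 1 + (buildT ws').length := by
      have := congrArg List.length hdrop'
      simp at this
      omega
    have hm : i + w.length + 1 ≤ T.length := by omega
    have hdropm : T.drop (i + w.length + 1) = buildT ws' := by
      have h2 : List.drop (w.length + 1) (List.drop i T) = List.drop (i + (w.length + 1)) T := by
        rw [List.drop_drop]
      have h3 : List.drop (w.length + 1) (w ++ ' ' :: buildT ws') = buildT ws' := by
        rw [show w ++ ' ' :: buildT ws' = (w ++ [' ']) ++ buildT ws' by simp,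
          show w.length + 1 = (w ++ [' ']).length by simp, List.drop_left]
      rw [show i + w.length + 1 = i + (w.length + 1) by omega, ← h2, hdrop', h3]
    rw [PySem.List.pyRange_one_append (i : Int) ((i + w.length + 1 : Nat) : Int) (T.length : Int)
        (by exact_mod_cast Nat.le_add_right i (w.length + 1) |>.trans_eq (by omega))
        (by exact_mod_cast hm),
      List.foldl_append,
      token_run bl T hbl w i (buildT ws') s (hws w (by simp)) hdrop',
      ih (i + w.length + 1) _ (fun v hv => hws v (by simp [hv])) hdropm hm]
    cases hany : w.any (bl.contains ·) with
    | true =>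
      have hany' : (w.any fun x => decide (x ∈ bl)) = true := by simpa using hany
      simp [hany']
    | false =>
      have hany' : (w.any fun x => decide (x ∈ bl)) = false := by simpa using hany
      simp [hany']

theorem pyGet_last (l : List Char) (h : l ≠ []) :
    PySem.List.pyGet? l (-1) = some (l.getLast h) := by
  have hn : 1 ≤ l.length := List.length_pos_of_ne_nil h
  have h1 : PySem.List.pyIdx? l.length (-1) = some (l.length - 1) := by
    simp [PySem.List.pyIdx?]
    omega
  rw [PySem.List.pyGet?, h1]
  simp [List.getLast_eq_getElem, List.getElem?_eq_getElem (by omega : l.length - 1 < l.length)]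

theorem endswith_single (l : List Char) (h : l ≠ []) :
    PySem.Chars.endswith l [' '] = true ↔ l.getLast h = ' ' := by
  rw [PySem.Chars.endswith_iff]
  constructor
  · rintro ⟨t, rfl⟩
    simp
  · intro hc
    refine ⟨l.dropLast, ?_⟩
    conv_rhs => rw [← List.dropLast_append_getLast h]
    rw [hc]

theorem core_run (bl T : List Char) (hbl : ' ' ∉ bl) (hne : T ≠ [])
    (hlast : T.getLast hne = ' ') :
    PySem.List.slice
        (((PySem.List.pyRange 0 (T.length : Int)).foldl (stepA bl T) ([], false, 0)).1)
        (some 0) (some (-1))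
      = PySem.Chars.join [' ']
          ((PySem.List.slice (PySem.Chars.splitOn T [' ']) none (some (-1))).filter
            (fun w => !w.any (bl.contains ·))) := by
  have hbuild : T = buildT ((toks [] T).dropLast) := by
    simpa using toks_buildT T [] hne hlast
  have hrun := machine_run bl T hbl ((toks [] T).dropLast) 0 []
    (toks_dropLast_space_free T [] (by simp)) (by simpa using hbuild) (by omega)
  rw [show ((0 : Nat) : Int) = (0 : Int) by simp] at hrun
  rw [hrun]
  rw [splitOn_eq_toks, PySem.List.slice_to_neg_one]
  simp only [List.nil_append]
  rw [show List.flatMap (fun w => w ++ [' '])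
        (List.filter (fun w => !w.any (bl.contains ·)) ((toks [] T).dropLast))
      = buildT (List.filter (fun w => !w.any (bl.contains ·)) ((toks [] T).dropLast)) from rfl]
  rw [show PySem.List.slice (buildT (List.filter (fun w => !w.any (bl.contains ·)) ((toks [] T).dropLast))) (some 0) (some (-1))
      = (buildT (List.filter (fun w => !w.any (bl.contains ·)) ((toks [] T).dropLast))).dropLast from by
    rw [PySem.List.slice_zero_start, PySem.List.slice_to_neg_one]]
  rw [dropLast_buildT]
  rfl

-- ===== VERDICT (by name: the statement is the Claim_ definition above) =====
theorem delete_word_spec : Claim_equal_delete_word := by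
  intro a b _ hpre
  unfold Spec_delete_word
  have hl : a.toList ≠ [] := fun h => hpre (String.toList_eq_nil_iff.mp h)
  have hget : PySem.Str.pyGet? a (-1) = some (a.toList.getLast hl) := by
    rw [PySem.Str.pyGet?_eq, PySem.Chars.pyGet?_eq_listPyGet?, pyGet_last a.toList hl]
  simp only [delete_word, delete_word_alt, hget]
  set bl : List Char := b.toList.foldl (fun acc i => if i ≠ ' ' then acc ++ [i] else acc) [] with hbl0
  have hblf : bl = b.toList.filter (fun c => decide (c ≠ ' ')) := by
    rw [hbl0, PySem.List.foldl_append_ite_eq_filter]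
    simp
  have hbl : ' ' ∉ bl := by
    rw [hblf]
    simp
  have hset : ∀ c, PySem.Set.contains (PySem.Set.ofList (b.toList.filter (fun c => decide (c ≠ ' ')))) c
      = bl.contains c := by
    intro c
    rw [hblf]
    simp [PySem.Set.contains, PySem.Set.mem_ofList]
  have hfilter : ∀ (ws : List (List Char)),
      ws.filter (fun w => w.all (fun c => !(PySem.Set.contains (PySem.Set.ofList (b.toList.filter (fun c => decide (c ≠ ' ')))) c)))
        = ws.filter (fun w => !w.any (bl.contains ·)) := by
    intro ws
    apply List.filter_congr
    intro w _
    rw [← List.not_any_eq_all_not]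
    congr 1
    exact PySem.List.any_congr_mem (fun c _ => hset c)
  by_cases hsp : a.toList.getLast hl = ' '
  · have hend : PySem.Chars.endswith a.toList [' '] = true := (endswith_single a.toList hl).mpr hsp
    rw [if_neg (fun hcon => hcon hsp), if_pos hend, hfilter]
    exact congrArg String.ofList (core_run bl a.toList hbl hl hsp)
  · have hend : PySem.Chars.endswith a.toList [' '] = false := by
      cases he : PySem.Chars.endswith a.toList [' '] with
      | true => exact absurd ((endswith_single a.toList hl).mp he) hsp
      | false => rfl
    have hne2 : a.toList ++ [' '] ≠ [] := by simp
    have hlast2 : (a.toList ++ [' ']).getLast hne2 = ' ' := List.getLast_concat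
    rw [if_pos hsp, if_neg (by simp [hend]), hfilter]
    have := core_run bl (a.toList ++ [' ']) hbl hne2 hlast2
    simp only [List.length_append, List.length_cons, List.length_nil] at this ⊢
    exact congrArg String.ofList this
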